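-- pv_equiv track=rewrite | github.com/IndraPur1/Programming-Basics | praktikum daspro/coba coba.py | DNAtoBinary
-- ===== SOURCE A (Python) =====
-- def FirstElmt(L):
--     return L[0]
--
-- def IsEmpty(L):
--     return L == []
--
-- def konso(e,L):
--     if L == [] :
--         return [e]
--     else :
--         return [e] + L
--
-- def Tail(L):
--     return L[1:]
--
-- def DNAtoBinary (DNA):
--     if IsEmpty(DNA):
--       return []
--     else:
--       if FirstElmt(DNA) == 'A' :
--         return konso('00',DNAtoBinary(Tail(DNA)))
--       elif FirstElmt(DNA) == 'G':
--         return konso('10',DNAtoBinary(Tail(DNA)))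
--       elif FirstElmt(DNA) == 'C' :
--         return konso('01',DNAtoBinary(Tail(DNA)))
--       elif FirstElmt(DNA) == 'T' :
--         return konso('11',DNAtoBinary(Tail(DNA)))
--       else:
--         return konso(FirstElmt(DNA),DNAtoBinary(Tail(DNA)))
-- ===== SOURCE B (Python) =====
-- _CODE = {'A': '00', 'G': '10', 'C': '01', 'T': '11'}
--
-- def DNAtoBinary(DNA):
--     result = []
--     rest = DNA
--     while rest != []:
--         c = rest[0]
--         result.append(_CODE.get(c, c))
--         rest = rest[1:]
--     return result
-- ===== Notes on version B (the rewrite author's own statement) =====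
-- stated objective: idiomatic
-- what changed: Replaced head/tail recursion with konso-style consing by an iterative accumulator loop that appends the mapped code looked up in a dict with .get(c, c) fallback.
import Mathlib
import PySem

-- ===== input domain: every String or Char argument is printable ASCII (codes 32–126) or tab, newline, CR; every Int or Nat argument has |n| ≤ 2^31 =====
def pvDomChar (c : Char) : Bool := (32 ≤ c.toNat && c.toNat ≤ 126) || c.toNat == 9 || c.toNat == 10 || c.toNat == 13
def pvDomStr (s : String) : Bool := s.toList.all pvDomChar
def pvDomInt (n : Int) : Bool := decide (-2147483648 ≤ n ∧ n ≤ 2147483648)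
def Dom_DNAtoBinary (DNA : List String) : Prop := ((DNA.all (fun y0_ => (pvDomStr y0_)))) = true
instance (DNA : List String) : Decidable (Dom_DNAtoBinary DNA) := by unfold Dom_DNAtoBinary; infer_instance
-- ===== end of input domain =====

-- B replaces A's head/tail recursion through konso with an iterative accumulator loop over a dict lookup (objective: idiomatic; no speed claim).
-- ===== PORT A =====
def konso (e : String) (L : List String) : List String :=
  if L = [] then [e] else [e] ++ L

def DNAtoBinary (DNA : List String) : List String :=
  match DNA with
  | [] => []
  | c :: rest =>
    if c = "A" then konso "00" (DNAtoBinary rest)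
    else if c = "G" then konso "10" (DNAtoBinary rest)
    else if c = "C" then konso "01" (DNAtoBinary rest)
    else if c = "T" then konso "11" (DNAtoBinary rest)
    else konso c (DNAtoBinary rest)

-- ===== PORT B =====
def altCode : PySem.Dict String String :=
  (PySem.Dict.empty.insert "A" "00" |>.insert "G" "10" |>.insert "C" "01" |>.insert "T" "11")

def altLoop (result : List String) (rest : List String) : List String :=
  match rest with
  | [] => result
  | c :: rest' => altLoop (result ++ [altCode.getD c c]) rest'

def DNAtoBinary_alt (DNA : List String) : List String := altLoop [] DNA

-- ===== PRECONDITION & SPEC =====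
def Spec_DNAtoBinary (DNA : List String) (out : List String) : Prop := out = DNAtoBinary_alt DNA
instance (DNA : List String) (out : List String) : Decidable (Spec_DNAtoBinary DNA out) := by unfold Spec_DNAtoBinary; infer_instance

-- ===== CLAIM (what is proved, stated in full; the proofs are below) =====
def Claim_equal_DNAtoBinary : Prop := ∀ (DNA : List String), Dom_DNAtoBinary DNA → Spec_DNAtoBinary DNA (DNAtoBinary DNA)

-- ===== LEMMAS AND PROOFS =====

-- ===== VERDICT (by name: the statement is the Claim_ definition above) =====
theorem getD_altCode (c : String) :
    altCode.getD c c =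
      if c = "A" then "00" else if c = "G" then "10" else if c = "C" then "01"
      else if c = "T" then "11" else c := by
  by_cases hA : c = "A"
  · subst hA; decide
  by_cases hG : c = "G"
  · subst hG; decide
  by_cases hC : c = "C"
  · subst hC; decide
  by_cases hT : c = "T"
  · subst hT; decide
  have h1 : ("A" == c) = false := beq_eq_false_iff_ne.mpr (Ne.symm hA)
  have h2 : ("G" == c) = false := beq_eq_false_iff_ne.mpr (Ne.symm hG)
  have h3 : ("C" == c) = false := beq_eq_false_iff_ne.mpr (Ne.symm hC)
  have h4 : ("T" == c) = false := beq_eq_false_iff_ne.mpr (Ne.symm hT)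
  simp [altCode, PySem.Dict.getD, PySem.Dict.get?, PySem.Dict.insert, PySem.Dict.empty,
    List.find?, h1, h2, h3, h4, hA, hG, hC, hT]

theorem konso_eq (e : String) (L : List String) : konso e L = e :: L := by
  unfold konso; split <;> simp_all

theorem altLoop_eq (rest : List String) : ∀ acc, altLoop acc rest = acc ++ DNAtoBinary rest := by
  induction rest with
  | nil => intro acc; simp [altLoop, DNAtoBinary]
  | cons c r ih =>
    intro acc
    simp only [altLoop, DNAtoBinary, ih, getD_altCode, konso_eq]
    split_ifs <;> simp

theorem DNAtoBinary_spec : Claim_equal_DNAtoBinary := by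
  intro DNA _
  unfold Spec_DNAtoBinary DNAtoBinary_alt
  simp [altLoop_eq]
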